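-- pv_equiv track=rewrite | github.com/SkywalkerJLi/learn_to_decompose | src/python_research_starter/subgoal_pipeline/test_learn2decompose_subgoalgeneration.py | create_edge_dict
-- ===== SOURCE A (Python) =====
-- def create_edge_dict(num_nodes):
--     edge_dict = {}
--     count = 0
--     for i in range(num_nodes):
--         for j in range(i + 1, num_nodes):
--             edge_dict[tuple((i, j))] = count
--             count += 1
--             edge_dict[tuple((j, i))] = count
--             count += 1
--     return edge_dict
-- ===== SOURCE B (Python) =====
-- def create_edge_dict(num_nodes):
--     # closed-form index: edge (i, j) with i < j has rank r = i*(2n-i-1)/2 + (j-i-1);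
--     # value 2r for (i, j) and 2r + 1 for (j, i), written without the division.
--     n = num_nodes
--     return {
--         key: i * (2 * n - i - 1) + 2 * (j - i - 1) + b
--         for i in range(n)
--         for j in range(i + 1, n)
--         for b, key in enumerate(((i, j), (j, i)))
--     }
-- ===== Notes on version B (the rewrite author's own statement) =====
-- stated objective: alternative
-- what changed: B replaces A's mutable running counter with a closed-form index formula (triangular-number rank, written without division) and builds the dict in a single comprehension over the ordered pairs instead of A's statement loop with accumulator state.
import Mathlib
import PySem

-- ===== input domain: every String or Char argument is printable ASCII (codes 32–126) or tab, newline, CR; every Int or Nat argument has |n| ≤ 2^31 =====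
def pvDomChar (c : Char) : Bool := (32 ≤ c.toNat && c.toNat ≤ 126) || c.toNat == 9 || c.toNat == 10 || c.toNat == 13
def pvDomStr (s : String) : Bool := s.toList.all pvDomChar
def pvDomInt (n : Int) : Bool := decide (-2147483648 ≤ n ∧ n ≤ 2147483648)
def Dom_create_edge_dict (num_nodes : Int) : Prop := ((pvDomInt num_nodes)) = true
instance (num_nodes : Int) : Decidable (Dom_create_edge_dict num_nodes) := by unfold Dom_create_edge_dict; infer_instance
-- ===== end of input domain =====

-- B builds the same dict by a closed-form index formula in one comprehension instead of A's running counter (objective: alternative).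

-- dict entry assignment d[(i,j)] = v on the flattened association list: overwrite first matching key in place, else append.
def pvInsert (d : List (Int × Int × Int)) (e : Int × Int × Int) : List (Int × Int × Int) :=
  match d with
  | [] => [e]
  | x :: rest => if x.1 = e.1 ∧ x.2.1 = e.2.1 then e :: rest else x :: pvInsert rest e

-- ===== PORT A =====
def create_edge_dict (num_nodes : Int) : List (Int × Int × Int) :=
  ((PySem.List.pyRange 0 num_nodes 1).foldl
      (fun (s : List (Int × Int × Int) × Int) i =>
        (PySem.List.pyRange (i + 1) num_nodes 1).foldl
          (fun (s : List (Int × Int × Int) × Int) j =>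
            (pvInsert (pvInsert s.1 (i, j, s.2)) (j, i, s.2 + 1), s.2 + 2)) s)
      (([] : List (Int × Int × Int)), (0 : Int))).1

-- ===== PORT B =====
def create_edge_dict_alt (num_nodes : Int) : List (Int × Int × Int) :=
  ((PySem.List.pyRange 0 num_nodes 1).flatMap (fun i =>
    (PySem.List.pyRange (i + 1) num_nodes 1).flatMap (fun j =>
      [(i, j, i * (2 * num_nodes - i - 1) + 2 * (j - i - 1)),
       (j, i, i * (2 * num_nodes - i - 1) + 2 * (j - i - 1) + 1)]))).foldl pvInsert []

-- ===== PRECONDITION & SPEC =====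
def Spec_create_edge_dict (num_nodes : Int) (out : List (Int × Int × Int)) : Prop := out = create_edge_dict_alt num_nodes
instance (num_nodes : Int) (out : List (Int × Int × Int)) : Decidable (Spec_create_edge_dict num_nodes out) := by unfold Spec_create_edge_dict; infer_instance

-- ===== CLAIM (what is proved, stated in full; the proofs are below) =====
def Claim_equal_create_edge_dict : Prop := ∀ (num_nodes : Int), Dom_create_edge_dict num_nodes → Spec_create_edge_dict num_nodes (create_edge_dict num_nodes)

-- ===== LEMMAS AND PROOFS =====

theorem pyRange_one_nil {a b : Int} (h : b ≤ a) : PySem.List.pyRange a b 1 = [] := by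
  simp [PySem.List.pyRange]
  omega

-- inner loop: the j-fold starting with counter c = base + 2*(j - i - 1) equals inserting
-- the closed-form row entries, finishing with counter base + 2*(n - i - 1).
theorem inner_eq (i n base : Int) : ∀ (k : Nat) (j c : Int) (d : List (Int × Int × Int)),
    (n - j).toNat = k → j ≤ n → c = base + 2 * (j - i - 1) →
    (PySem.List.pyRange j n 1).foldl
      (fun (s : List (Int × Int × Int) × Int) j' =>
        (pvInsert (pvInsert s.1 (i, j', s.2)) (j', i, s.2 + 1), s.2 + 2)) (d, c)
    = (((PySem.List.pyRange j n 1).flatMap (fun j' =>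
        [(i, j', base + 2 * (j' - i - 1)), (j', i, base + 2 * (j' - i - 1) + 1)])).foldl pvInsert d,
       base + 2 * (n - i - 1)) := by
  intro k
  induction k with
  | zero =>
    intro j c d hk hj hc
    have hjn : j = n := by omega
    subst hjn
    rw [pyRange_one_nil le_rfl]
    simp only [List.flatMap_nil, List.foldl_nil, Prod.mk.injEq]
    exact ⟨trivial, by omega⟩
  | succ k ih =>
    intro j c d hk hj hc
    have hlt : j < n := by omega
    rw [PySem.List.pyRange_one_cons hlt]
    simp only [List.foldl_cons, List.flatMap_cons]
    rw [ih (j + 1) (c + 2) _ (by omega) (by omega) (by omega)]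
    subst hc
    simp [List.foldl]

-- outer loop: starting at row i with counter i*(2n - i - 1), the rest of A's fold
-- equals inserting all remaining closed-form entries.
theorem outer_eq (n : Int) : ∀ (k : Nat) (i : Int) (d : List (Int × Int × Int)),
    (n - i).toNat = k → i ≤ n →
    (PySem.List.pyRange i n 1).foldl
      (fun (s : List (Int × Int × Int) × Int) i' =>
        (PySem.List.pyRange (i' + 1) n 1).foldl
          (fun (s : List (Int × Int × Int) × Int) j =>
            (pvInsert (pvInsert s.1 (i', j, s.2)) (j, i', s.2 + 1), s.2 + 2)) s)
      (d, i * (2 * n - i - 1))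
    = (((PySem.List.pyRange i n 1).flatMap (fun i' =>
        (PySem.List.pyRange (i' + 1) n 1).flatMap (fun j =>
          [(i', j, i' * (2 * n - i' - 1) + 2 * (j - i' - 1)),
           (j, i', i' * (2 * n - i' - 1) + 2 * (j - i' - 1) + 1)]))).foldl pvInsert d,
       n * (n - 1)) := by
  intro k
  induction k with
  | zero =>
    intro i d hk hi
    have : i = n := by omega
    subst this
    rw [pyRange_one_nil le_rfl]
    simp only [List.flatMap_nil, List.foldl_nil, Prod.mk.injEq]
    exact ⟨trivial, by ring⟩
  | succ k ih =>
    intro i d hk hi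
    have hlt : i < n := by omega
    rw [PySem.List.pyRange_one_cons hlt]
    simp only [List.foldl_cons, List.flatMap_cons]
    rw [inner_eq i n (i * (2 * n - i - 1)) (n - (i+1)).toNat (i+1)
          (i * (2 * n - i - 1)) d rfl (by omega) (by ring)]
    have hc : i * (2 * n - i - 1) + 2 * (n - i - 1) = (i + 1) * (2 * n - (i + 1) - 1) := by ring
    rw [hc, ih (i + 1) _ (by omega) (by omega)]
    rw [List.foldl_append]

theorem create_edge_dict_spec : Claim_equal_create_edge_dict := by
  intro n _
  unfold Spec_create_edge_dict create_edge_dict create_edge_dict_alt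
  rcases le_or_gt n 0 with h | h
  · rw [pyRange_one_nil h]
    simp [List.foldl]
  · have h0 : (0:Int) * (2 * n - 0 - 1) = 0 := by ring
    rw [show ((0:Int)) = (0:Int) from rfl]
    have := outer_eq n (n - 0).toNat 0 [] rfl (by omega)
    rw [h0] at this
    rw [this]
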